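-- pv_equiv track=rewrite | github.com/asjad2401/Foobar-Solutions | solar-ray.py | solution
-- ===== SOURCE A (Python) =====
-- def solution(pegs):
--     n = len(pegs)
--     numerator = pegs[1] - pegs[0]
--     denominator = 1
--     min_even = numerator
--     max_odd = 0
--
--     for i in range(2, n):
--         if i % 2 == 0:
--             numerator += -(pegs[i] - pegs[i - 1])
--             if numerator > max_odd:
--                 max_odd = numerator
--         else:
--             numerator += pegs[i] - pegs[i - 1]
--             if numerator < min_even:
--                 min_even = numerator
--
--     numerator *= 2
--     if n % 2 == 0:
--         if numerator % 3 == 0: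
--             numerator /= 3
--         else:
--             denominator = 3
--
--     if numerator < (max_odd + 1) * denominator or numerator > (min_even - 1) * denominator:
--         numerator = denominator = -1
--
--     return [int(numerator), int(denominator)]
-- ===== SOURCE B (Python) =====
-- def solution(pegs):
--     # Return-value equivalent re-implementation: telescoping back-to-front sum
--     # for the first radius, then a forward radius-reconstruction pass for feasibility.
--     diffs = [b - a for a, b in zip(pegs, pegs[1:])]
--     s = 0
--     for d in reversed(diffs):
--         s = d - s
--     num, den = 2 * s, 1
--     if len(pegs) % 2 == 0:
--         if num % 3 == 0:
--             num //= 3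
--         else:
--             den = 3
--     r = num
--     if r < den:
--         return [-1, -1]
--     for d in diffs:
--         r = d * den - r
--         if r < den:
--             return [-1, -1]
--     return [num, den]
-- ===== Notes on version B (the rewrite author's own statement) =====
-- stated objective: alternative
-- what changed: B computes the first radius from a back-to-front telescoping fold over the gap list and decides feasibility by a forward pass that reconstructs every gear radius and checks r_i >= 1, instead of A's single indexed loop that tracks min-even/max-odd partial sums and compares the scaled numerator against (max_odd+1) and (min_even-1).
-- outside the precondition, e.g. on solution([1]): A raises IndexError, B returns [-1, -1]
import Mathlib
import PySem

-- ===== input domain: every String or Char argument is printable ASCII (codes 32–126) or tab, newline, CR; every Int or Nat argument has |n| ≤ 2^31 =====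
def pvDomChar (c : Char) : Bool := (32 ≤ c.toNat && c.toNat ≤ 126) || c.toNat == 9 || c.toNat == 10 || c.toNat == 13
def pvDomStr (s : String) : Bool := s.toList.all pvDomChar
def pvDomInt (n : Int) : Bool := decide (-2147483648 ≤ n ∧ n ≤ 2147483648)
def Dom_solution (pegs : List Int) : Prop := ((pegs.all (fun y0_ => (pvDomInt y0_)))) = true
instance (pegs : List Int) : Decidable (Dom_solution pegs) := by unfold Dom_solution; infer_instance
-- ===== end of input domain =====

-- B replaces A's min/max partial-sum bookkeeping with a backward telescoping sum plus a
-- forward radius-reconstruction feasibility pass; same return value on all pegs with len ≥ 2.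

-- ===== PORT A =====
-- the loop body of A's `for i in range(2, n)` (state = (numerator, min_even, max_odd))
def solutionStep (pegs : List Int) (st : Int × Int × Int) (i : Int) : Int × Int × Int :=
  if PySem.Int.mod i 2 == 0 then
    let numerator := st.1 + -(PySem.List.pyGetD pegs i 0 - PySem.List.pyGetD pegs (i - 1) 0)
    (numerator, st.2.1, if numerator > st.2.2 then numerator else st.2.2)
  else
    let numerator := st.1 + (PySem.List.pyGetD pegs i 0 - PySem.List.pyGetD pegs (i - 1) 0)
    (numerator, if numerator < st.2.1 then numerator else st.2.1, st.2.2)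

-- Pre_solution keeps all indices in range, so the pyGetD defaults are never used.
-- `numerator /= 3` is Python float true division, taken only when 3 ∣ numerator, so it is
-- exact and equals floor division here.
def solution (pegs : List Int) : List Int :=
  let n : Int := (pegs.length : Int)
  let numerator := PySem.List.pyGetD pegs 1 0 - PySem.List.pyGetD pegs 0 0
  let st := (PySem.List.pyRange 2 n 1).foldl (solutionStep pegs) (numerator, numerator, 0)
  let numerator := st.1 * 2
  let nd : Int × Int :=
    if PySem.Int.mod n 2 == 0 then
      if PySem.Int.mod numerator 3 == 0 then (PySem.Int.floordiv numerator 3, 1)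
      else (numerator, 3)
    else (numerator, 1)
  if nd.1 < (st.2.2 + 1) * nd.2 || nd.1 > (st.2.1 - 1) * nd.2 then [-1, -1]
  else [nd.1, nd.2]

-- ===== PORT B =====
-- Source B's `for d in diffs` loop with its early `return [-1, -1]`
def radiiOk (den : Int) : Int → List Int → Bool
  | _, [] => true
  | r, d :: ds => if d * den - r < den then false else radiiOk den (d * den - r) ds

def solution_alt (pegs : List Int) : List Int :=
  let diffs := (pegs.zip (PySem.List.slice pegs (some 1) none)).map (fun p => p.2 - p.1)
  let s := diffs.reverse.foldl (fun s d => d - s) 0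
  let nd : Int × Int :=
    if PySem.Int.mod ((pegs.length : Int)) 2 == 0 then
      if PySem.Int.mod (2 * s) 3 == 0 then (PySem.Int.floordiv (2 * s) 3, 1)
      else (2 * s, 3)
    else (2 * s, 1)
  if nd.1 < nd.2 then [-1, -1]
  else if radiiOk nd.2 nd.1 diffs then [nd.1, nd.2] else [-1, -1]

-- ===== PRECONDITION & SPEC =====
-- A evaluates pegs[1]; it raises IndexError on lists of length < 2.
def Pre_solution (pegs : List Int) : Prop := 2 ≤ pegs.length
instance (pegs : List Int) : Decidable (Pre_solution pegs) := by unfold Pre_solution; infer_instance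
def pvWitness_solution : List Int := [4, 30, 50]

def Spec_solution (pegs : List Int) (out : List Int) : Prop := out = solution_alt pegs
instance (pegs : List Int) (out : List Int) : Decidable (Spec_solution pegs out) := by unfold Spec_solution; infer_instance

-- ===== CLAIM (what is proved, stated in full; the proofs are below) =====
def Claim_equal_solution : Prop := ∀ (pegs : List Int), Dom_solution pegs → Pre_solution pegs → Spec_solution pegs (solution pegs)

-- ===== LEMMAS AND PROOFS =====

def aFold : List Int → Bool → Int × Int × Int → Int × Int × Int
  | [], _, st => st
  | d :: l, e, st =>
    if e then aFold l (!e) (st.1 - d, st.2.1, if st.1 - d > st.2.2 then st.1 - d else st.2.2)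
    else aFold l (!e) (st.1 + d, if st.1 + d < st.2.1 then st.1 + d else st.2.1, st.2.2)

def asgn : Bool → List Int → Int
  | _, [] => 0
  | e, d :: l => (if e then -d else d) + asgn (!e) l

def bsum : List Int → Int
  | [] => 0
  | d :: l => d - bsum l

lemma revfold_eq_bsum : ∀ (l : List Int), l.reverse.foldl (fun s d => d - s) 0 = bsum l := by
  intro l
  induction l with
  | nil => rfl
  | cons d l ih => simp [List.foldl_append, bsum, ih]

lemma asgn_eq_bsum : ∀ (l : List Int), asgn true l = -bsum l ∧ asgn false l = bsum l := by
  intro l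
  induction l with
  | nil => simp [asgn, bsum]
  | cons d l ih => simp [asgn, bsum]; omega

lemma aFold_fst : ∀ (l : List Int) (e : Bool) (st : Int × Int × Int),
    (aFold l e st).1 = st.1 + asgn e l := by
  intro l
  induction l with
  | nil => intro e st; simp [aFold, asgn]
  | cons d l ih => intro e st; cases e <;> simp [aFold, asgn, ih] <;> ring
lemma radiiOk_cons_false (den r d : Int) (l : List Int) :
    (radiiOk den r (d :: l) = false) ↔ (d * den - r < den ∨ radiiOk den (d * den - r) l = false) := by
  by_cases h : d * den - r < den <;> simp [radiiOk, h]

lemma min_side (me x NUM den : Int) (hden : 0 < den) :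
    NUM > ((if x < me then x else me) - 1) * den ↔ (NUM > (me - 1) * den ∨ NUM > (x - 1) * den) := by
  split_ifs with h
  · exact ⟨fun hh => Or.inr hh, fun hh => hh.elim (fun hh => by nlinarith) id⟩
  · exact ⟨fun hh => Or.inl hh, fun hh => hh.elim id (fun hh => by nlinarith)⟩

lemma max_side (mo x NUM den : Int) (hden : 0 < den) :
    NUM < ((if x > mo then x else mo) + 1) * den ↔ (NUM < (mo + 1) * den ∨ NUM < (x + 1) * den) := by
  split_ifs with h
  · exact ⟨fun hh => Or.inr hh, fun hh => hh.elim (fun hh => by nlinarith) id⟩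
  · exact ⟨fun hh => Or.inl hh, fun hh => hh.elim id (fun hh => by nlinarith)⟩

lemma gt_iff_r (x NUM den : Int) : NUM > (x - 1) * den ↔ x * den - NUM < den := by
  constructor <;> intro h <;> nlinarith

lemma lt_iff_r (x NUM den : Int) : NUM < (x + 1) * den ↔ NUM - x * den < den := by
  constructor <;> intro h <;> nlinarith

lemma key : ∀ (l : List Int) (e : Bool) (N me mo NUM den : Int), 0 < den →
    ((NUM < ((aFold l e (N, me, mo)).2.2 + 1) * den ∨ NUM > ((aFold l e (N, me, mo)).2.1 - 1) * den)
     ↔ (NUM < (mo + 1) * den ∨ NUM > (me - 1) * den ∨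
        radiiOk den (if e then N * den - NUM else NUM - N * den) l = false)) := by
  intro l
  induction l with
  | nil => intro e N me mo NUM den hden; simp [aFold, radiiOk]
  | cons d l ih =>
    intro e N me mo NUM den hden
    cases e
    · -- odd index
      have h1 : aFold (d :: l) false (N, me, mo)
          = aFold l true (N + d, if N + d < me then N + d else me, mo) := by simp [aFold]
      have h2 : d * den - (NUM - N * den) = (N + d) * den - NUM := by ring
      rw [h1, ih true (N + d) (if N + d < me then N + d else me) mo NUM den hden]
      rw [if_neg (by simp : ¬ (false = true)), min_side me (N + d) NUM den hden,
        radiiOk_cons_false den (NUM - N * den) d l, h2, ← gt_iff_r (N + d) NUM den]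
      tauto
    · -- even index
      have h1 : aFold (d :: l) true (N, me, mo)
          = aFold l false (N - d, me, if N - d > mo then N - d else mo) := by simp [aFold]
      have h2 : d * den - (N * den - NUM) = NUM - (N - d) * den := by ring
      rw [h1, ih false (N - d) me (if N - d > mo then N - d else mo) NUM den hden]
      rw [if_pos rfl, max_side mo (N - d) NUM den hden,
        radiiOk_cons_false den (N * den - NUM) d l, h2, ← lt_iff_r (N - d) NUM den]
      tauto
def mkD (pegs : List Int) : List Int := (pegs.zip pegs.tail).map (fun p => p.2 - p.1)

lemma mkD_length (pegs : List Int) : (mkD pegs).length = pegs.length - 1 := by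
  simp [mkD, List.length_zip]

lemma mkD_getElem (pegs : List Int) (j : Nat) (h : j < (mkD pegs).length) :
    (mkD pegs)[j] = pegs.getD (j + 1) 0 - pegs.getD j 0 := by
  have hl := mkD_length pegs
  have h1 : j + 1 < pegs.length := by omega
  have h0 : j < pegs.length := by omega
  have ht : j < pegs.tail.length := by simp [List.length_tail]; omega
  simp [mkD, List.getElem_zip, List.getElem_tail, List.getD_eq_getElem?_getD,
    List.getElem?_eq_getElem h1, List.getElem?_eq_getElem h0]

lemma parity_flip (j : Nat) : (!decide ((j + 1) % 2 = 0)) = decide ((j + 2) % 2 = 0) := by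
  by_cases h : (j + 1) % 2 = 0 <;> simp [h] <;> omega

lemma bridge (pegs : List Int) : ∀ (t j : Nat) (st : Int × Int × Int), 1 ≤ j →
    j + t = pegs.length →
    (PySem.List.pyRange ((j : Int) + 1) (pegs.length : Int) 1).foldl (solutionStep pegs) st
      = aFold ((mkD pegs).drop j) (decide ((j + 1) % 2 = 0)) st := by
  intro t
  induction t with
  | zero =>
    intro j st hj hjt
    rw [PySem.List.pyRange_one_eq_nil (by omega : (pegs.length : Int) ≤ (j : Int) + 1)]
    rw [List.drop_eq_nil_of_le (by rw [mkD_length]; omega)]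
    rfl
  | succ t ih =>
    intro j st hj hjt
    by_cases hlt : (j : Int) + 1 < (pegs.length : Int)
    · have hjd : j < (mkD pegs).length := by rw [mkD_length]; omega
      rw [PySem.List.pyRange_one_cons hlt, List.foldl_cons,
        List.drop_eq_getElem_cons hjd]
      have hstep : solutionStep pegs st ((j : Int) + 1)
          = if decide ((j + 1) % 2 = 0) then
              (st.1 - (mkD pegs)[j], st.2.1,
                if st.1 - (mkD pegs)[j] > st.2.2 then st.1 - (mkD pegs)[j] else st.2.2)
            else
              (st.1 + (mkD pegs)[j], if st.1 + (mkD pegs)[j] < st.2.1 then st.1 + (mkD pegs)[j] else st.2.1,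
                st.2.2) := by
        have hcast : (j : Int) + 1 = ((j + 1 : Nat) : Int) := by push_cast; ring
        have hg1 : PySem.List.pyGetD pegs ((j : Int) + 1) 0 = pegs.getD (j + 1) 0 := by
          rw [hcast, PySem.List.pyGetD_natCast]
        have hg0 : PySem.List.pyGetD pegs ((j : Int) + 1 - 1) 0 = pegs.getD j 0 := by
          rw [show (j : Int) + 1 - 1 = ((j : Nat) : Int) from by ring, PySem.List.pyGetD_natCast]
        have hmod : PySem.Int.mod ((j : Int) + 1) 2 = (((j + 1) % 2 : Nat) : Int) := by
          rw [hcast]; exact_mod_cast PySem.Int.mod_natCast (j + 1) 2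
        have hd : (mkD pegs)[j] = pegs.getD (j + 1) 0 - pegs.getD j 0 := mkD_getElem pegs j hjd
        by_cases hp : (j + 1) % 2 = 0
        · have : (PySem.Int.mod ((j : Int) + 1) 2 == 0) = true := by
            rw [hmod]; simp [hp]
          simp only [solutionStep, this, if_true, hg1, hg0, hp, decide_true]
          rw [show st.1 + -(pegs.getD (j + 1) 0 - pegs.getD j 0) = st.1 - (mkD pegs)[j] from by
            rw [hd]; ring]
        · have : (PySem.Int.mod ((j : Int) + 1) 2 == 0) = false := by
            rw [hmod]; simp; omega
          simp only [solutionStep, this, Bool.false_eq_true, if_false, hg1, hg0, ← hd]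
          simp [hp]
      rw [hstep]
      have harr : ((j : Int) + 1) + 1 = ((j + 1 : Nat) : Int) + 1 := by push_cast; ring
      rw [harr, ih (j + 1) _ (by omega) (by omega)]
      by_cases hp : (j + 1) % 2 = 0
      · simp only [hp, decide_true, if_true]
        rw [show aFold ((mkD pegs)[j] :: (mkD pegs).drop (j + 1)) true st
            = aFold ((mkD pegs).drop (j + 1)) (!true)
                (st.1 - (mkD pegs)[j], st.2.1,
                  if st.1 - (mkD pegs)[j] > st.2.2 then st.1 - (mkD pegs)[j] else st.2.2) from by
          simp [aFold]]
        rw [show (!true) = decide ((j + 1 + 1) % 2 = 0) from by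
          have := parity_flip j; simp [hp] at this ⊢; omega]
      · simp only [hp, decide_false, Bool.false_eq_true, if_false]
        rw [show aFold ((mkD pegs)[j] :: (mkD pegs).drop (j + 1)) false st
            = aFold ((mkD pegs).drop (j + 1)) (!false)
                (st.1 + (mkD pegs)[j],
                  if st.1 + (mkD pegs)[j] < st.2.1 then st.1 + (mkD pegs)[j] else st.2.1, st.2.2) from by
          simp [aFold]]
        rw [show (!false) = decide ((j + 1 + 1) % 2 = 0) from by simp; omega]
    · rw [PySem.List.pyRange_one_eq_nil (by omega), List.drop_eq_nil_of_le (by rw [mkD_length]; omega)]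
      rfl

theorem solution_eq_alt (pegs : List Int) (hp : 2 ≤ pegs.length) :
    solution pegs = solution_alt pegs := by
  have h0 : 0 < (mkD pegs).length := by rw [mkD_length]; omega
  have hd0 : (mkD pegs)[0] = pegs.getD 1 0 - pegs.getD 0 0 := by
    simpa using mkD_getElem pegs 0 h0
  have hsplit : mkD pegs = (mkD pegs)[0] :: (mkD pegs).tail := by
    have h := List.drop_eq_getElem_cons (i := 0) h0
    simpa [List.drop_one] using h
  simp only [solution, solution_alt, PySem.List.slice_from_one]
  have e1 : PySem.List.pyGetD pegs 1 0 - PySem.List.pyGetD pegs 0 0 = (mkD pegs)[0] := by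
    rw [hd0, show (1 : Int) = ((1 : Nat) : Int) from rfl,
      show (0 : Int) = ((0 : Nat) : Int) from rfl,
      PySem.List.pyGetD_natCast, PySem.List.pyGetD_natCast]
  rw [e1]
  have hbr : List.foldl (solutionStep pegs) ((mkD pegs)[0], (mkD pegs)[0], 0)
      (PySem.List.pyRange 2 (pegs.length : Int) 1)
      = aFold ((mkD pegs).tail) true ((mkD pegs)[0], (mkD pegs)[0], 0) := by
    have hb := bridge pegs (pegs.length - 1) 1 ((mkD pegs)[0], (mkD pegs)[0], 0) le_rfl (by omega)
    norm_num at hb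
    exact hb
  rw [hbr]
  have hst1 : (aFold ((mkD pegs).tail) true ((mkD pegs)[0], (mkD pegs)[0], 0)).1
      = bsum (mkD pegs) := by
    rw [aFold_fst, (asgn_eq_bsum ((mkD pegs).tail)).1]
    conv_rhs => rw [hsplit]
    simp [bsum]
    ring
  have hmk : (List.map (fun p => p.2 - p.1) (pegs.zip pegs.tail)) = mkD pegs := rfl
  rw [hst1, hmk, revfold_eq_bsum (mkD pegs), mul_comm (bsum (mkD pegs)) 2]
  set F := aFold ((mkD pegs).tail) true ((mkD pegs)[0], (mkD pegs)[0], 0) with hF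
  set ND : Int × Int :=
    (if (PySem.Int.mod ((pegs.length : Nat) : Int) 2 == 0) = true then
      if (PySem.Int.mod (2 * bsum (mkD pegs)) 3 == 0) = true then
        (PySem.Int.floordiv (2 * bsum (mkD pegs)) 3, 1)
      else (2 * bsum (mkD pegs), 3)
    else (2 * bsum (mkD pegs), 1)) with hND
  have hden : 0 < ND.2 := by
    rw [hND]; split_ifs <;> norm_num
  have hkey := key ((mkD pegs).tail) true ((mkD pegs)[0]) ((mkD pegs)[0]) 0 ND.1 ND.2 hden
  rw [← hF] at hkey
  rw [if_pos rfl] at hkey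
  have hA : (ND.1 < (F.2.2 + 1) * ND.2 ∨ ND.1 > (F.2.1 - 1) * ND.2)
      ↔ (ND.1 < ND.2 ∨ radiiOk ND.2 ND.1 (mkD pegs) = false) := by
    rw [hkey]
    conv_rhs => rw [hsplit]
    rw [radiiOk_cons_false]
    rw [← gt_iff_r ((mkD pegs)[0]) ND.1 ND.2]
    rw [zero_add, one_mul]
  by_cases hb1 : ND.1 < ND.2
  · have hc : (decide (ND.1 < (F.2.2 + 1) * ND.2) || decide (ND.1 > (F.2.1 - 1) * ND.2)) = true := by
      rcases hA.mpr (Or.inl hb1) with h | h <;> simp [h]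
    rw [if_pos hc, if_pos hb1]
  · by_cases hb2 : radiiOk ND.2 ND.1 (mkD pegs) = false
    · have hc : (decide (ND.1 < (F.2.2 + 1) * ND.2) || decide (ND.1 > (F.2.1 - 1) * ND.2)) = true := by
        rcases hA.mpr (Or.inr hb2) with h | h <;> simp [h]
      rw [if_pos hc, if_neg hb1, if_neg (by simp [hb2] : ¬ radiiOk ND.2 ND.1 (mkD pegs) = true)]
    · have hnp : ¬ (ND.1 < (F.2.2 + 1) * ND.2 ∨ ND.1 > (F.2.1 - 1) * ND.2) :=
        fun h => (hA.mp h).elim hb1 hb2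
      have hok : radiiOk ND.2 ND.1 (mkD pegs) = true := by
        revert hb2; cases radiiOk ND.2 ND.1 (mkD pegs) <;> simp
      rw [if_neg (by intro h; exact hnp (by simpa using h)), if_neg hb1, if_pos hok]

-- ===== VERDICT (by name: the statement is the Claim_ definition above) =====
theorem solution_spec : Claim_equal_solution := by
  intro pegs _ hpre
  unfold Spec_solution
  exact solution_eq_alt pegs hpre
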